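-- pv_equiv track=rewrite | github.com/ssaud1/masjidly | ingest_masjid_emails.py | _is_skipped_social_manifest_host
-- ===== SOURCE A (Python) =====
-- def _is_skipped_social_manifest_host(host: str) -> bool:
--     h = (host or "").lower()
--     for suf in (
--         "instagram.com",
--         "facebook.com",
--         "youtube.com",
--         "twitter.com",
--         "tiktok.com",
--         "x.com",
--     ):
--         if h == suf or h.endswith("." + suf):
--             return True
--     return False
-- ===== SOURCE B (Python) =====
-- _SOCIAL_DOMAINS = frozenset((
--     "instagram.com",
--     "facebook.com",
--     "youtube.com",
--     "twitter.com",
--     "tiktok.com",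
--     "x.com",
-- ))
--
--
-- def _is_skipped_social_manifest_host(host):
--     # Peel leading labels one at a time; the host matches iff some
--     # dot-aligned suffix of it is exactly one of the known domains.
--     h = (host or "").lower()
--     while h not in _SOCIAL_DOMAINS:
--         _, sep, h = h.partition(".")
--         if not sep:
--             return False
--     return True
-- ===== Notes on version B (the rewrite author's own statement) =====
-- stated objective: alternative
-- what changed: Instead of testing the lowercased host against six equality/endswith suffix patterns, B peels the leading label off the host one at a time via str.partition and does a single frozenset membership test per dot-aligned suffix.
import Mathlib
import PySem

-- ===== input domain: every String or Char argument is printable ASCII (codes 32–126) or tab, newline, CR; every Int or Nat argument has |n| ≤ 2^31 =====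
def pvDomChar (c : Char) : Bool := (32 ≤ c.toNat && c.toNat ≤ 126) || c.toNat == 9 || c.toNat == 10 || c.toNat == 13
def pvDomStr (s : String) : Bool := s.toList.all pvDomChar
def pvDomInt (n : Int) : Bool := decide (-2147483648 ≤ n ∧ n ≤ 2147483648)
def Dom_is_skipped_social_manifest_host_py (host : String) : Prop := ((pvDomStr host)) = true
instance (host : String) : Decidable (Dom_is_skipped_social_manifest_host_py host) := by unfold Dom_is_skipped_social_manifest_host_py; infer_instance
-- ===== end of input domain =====

-- B replaces A's loop of six equality/endswith suffix tests by a label-peeling loop: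
-- repeatedly check set membership of the current tail and strip through the first dot
-- (alternative structure, not claimed faster).

-- ===== PORT A =====
def pvSufsA : List (List Char) :=
  ["instagram.com".toList, "facebook.com".toList, "youtube.com".toList,
   "twitter.com".toList, "tiktok.com".toList, "x.com".toList]

def is_skipped_social_manifest_host_py (host : String) : Bool :=
  let h := PySem.Chars.lower (if host.toList = [] then ("".toList) else host.toList)
  pvSufsA.any (fun suf => h == suf || PySem.Chars.endswith h ('.' :: suf))

-- ===== PORT B =====
def pvSocialSet : PySem.Set (List Char) :=
  PySem.Set.ofList
    ["instagram.com".toList, "facebook.com".toList, "youtube.com".toList,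
     "twitter.com".toList, "tiktok.com".toList, "x.com".toList]

-- B's while-loop, as a recursion on the shrinking host tail.
-- `h.partition(".")` is ported by hand as takeWhile/dropWhile on the single
-- separator character '.': `sep` is truthy iff `dropWhile (· != '.') h` is
-- nonempty, and the third component is then its tail — exact for a 1-char sep.
def pvPeel (h : List Char) : Bool :=
  if PySem.Set.contains pvSocialSet h then true
  else
    match hm : h.dropWhile (· != '.') with
    | [] => false
    | _ :: tail => pvPeel tail
termination_by h.length
decreasing_by
  have hle : (h.dropWhile (· != '.')).length ≤ h.length := List.length_dropWhile_le _ _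
  rw [hm] at hle
  simp at hle
  omega

def is_skipped_social_manifest_host_py_alt (host : String) : Bool :=
  pvPeel (PySem.Chars.lower (if host.toList = [] then ("".toList) else host.toList))

-- ===== PRECONDITION & SPEC =====
def Spec_is_skipped_social_manifest_host_py (host : String) (out : Bool) : Prop := out = is_skipped_social_manifest_host_py_alt host
instance (host : String) (out : Bool) : Decidable (Spec_is_skipped_social_manifest_host_py host out) := by unfold Spec_is_skipped_social_manifest_host_py; infer_instance

-- ===== CLAIM (what is proved, stated in full; the proofs are below) =====
def Claim_equal_is_skipped_social_manifest_host_py : Prop := ∀ (host : String), Dom_is_skipped_social_manifest_host_py host → Spec_is_skipped_social_manifest_host_py host (is_skipped_social_manifest_host_py host)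

-- ===== LEMMAS AND PROOFS =====

-- the head of a nonempty dropWhile result fails the predicate: here it is '.'
theorem pv_dropWhile_head (l : List Char) (c : Char) (t : List Char)
    (hm : l.dropWhile (· != '.') = c :: t) : c = '.' := by
  induction l with
  | nil => simp [List.dropWhile] at hm
  | cons d rest ih =>
    by_cases hd : d = '.'
    · subst hd
      simp [List.dropWhile] at hm
      exact hm.1.symm
    · rw [List.dropWhile_cons_of_pos (by simpa using hd)] at hm
      exact ih hm

-- a dot-suffix of pre ++ '.' :: tail (pre dot-free) is tail itself or a dot-suffix of tail
theorem pv_suffix_step (pre tail s : List Char) (hpre : ∀ c ∈ pre, c ≠ '.')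
    (hs : ('.' :: s) <:+ (pre ++ '.' :: tail)) : s = tail ∨ ('.' :: s) <:+ tail := by
  induction pre with
  | nil =>
    obtain ⟨u, hu⟩ := hs
    cases u with
    | nil => simp at hu; exact Or.inl hu
    | cons c u' =>
      simp only [List.nil_append, List.cons_append, List.cons.injEq] at hu
      exact Or.inr ⟨u', hu.2⟩
  | cons c pre' ih =>
    obtain ⟨u, hu⟩ := hs
    cases u with
    | nil =>
      simp only [List.nil_append, List.cons_append, List.cons.injEq] at hu
      exact absurd hu.1.symm (hpre c (by simp))
    | cons d u' =>
      simp only [List.cons_append, List.cons.injEq] at hu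
      exact ih (fun x hx => hpre x (List.mem_cons_of_mem _ hx)) ⟨u', hu.2⟩

-- characterisation of B's loop: true iff some set element is h or a dot-suffix of h
theorem pvPeel_iff (h : List Char) :
    pvPeel h = true ↔ ∃ s, PySem.Set.contains pvSocialSet s = true ∧ (h = s ∨ ('.' :: s) <:+ h) := by
  induction h using pvPeel.induct with
  | case1 h hc =>
    rw [pvPeel, if_pos hc]
    exact ⟨fun _ => ⟨h, hc, Or.inl rfl⟩, fun _ => rfl⟩
  | case2 h hc hm =>
    rw [pvPeel, if_neg hc, hm]
    constructor
    · intro hfalse; exact absurd hfalse (by simp)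
    · rintro ⟨s, hs, rfl | ⟨u, hu⟩⟩
      · exact absurd hs hc
      · -- '.' ∈ h but dropWhile ate everything: contradiction
        have hdot : '.' ∈ h := by
          rw [← hu]; simp
        have : h.dropWhile (· != '.') ≠ [] := by
          intro hnil
          have := List.takeWhile_append_dropWhile (p := (· != '.')) (l := h)
          rw [hnil, List.append_nil] at this
          have hmem := List.mem_takeWhile_imp (l := h) (p := (· != '.')) (this ▸ hdot)
          simp at hmem
        exact absurd hm this
  | case3 h hc c tail hm ih =>
    rw [pvPeel, if_neg hc, hm]
    have hceq : c = '.' := pv_dropWhile_head h c tail hm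
    subst hceq
    have hdecomp : h = h.takeWhile (· != '.') ++ '.' :: tail := by
      conv_lhs => rw [← List.takeWhile_append_dropWhile (p := (· != '.')) (l := h)]
      rw [hm]
    have hpre : ∀ x ∈ h.takeWhile (· != '.'), x ≠ '.' := by
      intro x hx
      have := List.mem_takeWhile_imp hx
      simpa using this
    rw [ih]
    constructor
    · rintro ⟨s, hs, heq | hsuf⟩
      · exact ⟨s, hs, Or.inr (by rw [hdecomp, heq]; exact ⟨h.takeWhile (· != '.'), rfl⟩)⟩
      · exact ⟨s, hs, Or.inr (hsuf.trans (by
          rw [hdecomp]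
          exact ⟨h.takeWhile (· != '.') ++ ['.'], by simp⟩))⟩
    · rintro ⟨s, hs, heq | hsuf⟩
      · exact absurd (heq ▸ hs) hc
      · rw [hdecomp] at hsuf
        rcases pv_suffix_step _ tail s hpre hsuf with heq | hsuf'
        · exact ⟨s, hs, Or.inl heq.symm⟩
        · exact ⟨s, hs, Or.inr hsuf'⟩

-- the two ports agree on every lowered character list
theorem pv_main (l : List Char) :
    pvSufsA.any (fun suf => l == suf || PySem.Chars.endswith l ('.' :: suf)) = pvPeel l := by
  rw [Bool.eq_iff_iff, List.any_eq_true, pvPeel_iff]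
  constructor
  · rintro ⟨suf, hmem, hf⟩
    refine ⟨suf, ?_, ?_⟩
    · rw [PySem.Set.contains_iff, pvSocialSet, PySem.Set.mem_ofList]
      exact hmem
    · rcases Bool.or_eq_true _ _ |>.mp hf with he | he
      · exact Or.inl (by simpa using he)
      · exact Or.inr (by rw [← PySem.Chars.endswith_iff]; exact he)
  · rintro ⟨s, hs, hcase⟩
    have hmem : s ∈ pvSufsA := by
      rw [PySem.Set.contains_iff, pvSocialSet, PySem.Set.mem_ofList] at hs
      exact hs
    refine ⟨s, hmem, ?_⟩
    rcases hcase with he | he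
    · simp [he]
    · simp only [Bool.or_eq_true, beq_iff_eq, PySem.Chars.endswith_iff]
      exact Or.inr he

-- ===== VERDICT (by name: the statement is the Claim_ definition above) =====
theorem is_skipped_social_manifest_host_py_spec : Claim_equal_is_skipped_social_manifest_host_py := by
  intro host _
  unfold Spec_is_skipped_social_manifest_host_py
  unfold is_skipped_social_manifest_host_py is_skipped_social_manifest_host_py_alt
  exact pv_main _
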